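-- pv_equiv track=rewrite | github.com/batux/File-Based-OBS-System | OBS_SYSTEM/SeekOffsetCalculator.py | determineSeekValueAndOffset
-- ===== SOURCE A (Python) =====
-- def determineSeekValueAndOffset(recordDictionary, id):
--
--     jumpToSeekValue = 0
--     currentRecordOffset = 0
--     for key, recordOffset in recordDictionary.items():
--
--         if(key == id):
--             currentRecordOffset = recordOffset
--             break
--
--         jumpToSeekValue += recordOffset
--
--     return { "jumpToSeekValue": jumpToSeekValue, "currentRecordOffset": currentRecordOffset }
-- ===== SOURCE B (Python) =====
-- def determineSeekValueAndOffset(recordDictionary, id):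
--     keys = list(recordDictionary)
--     values = list(recordDictionary.values())
--     if id in keys:
--         idx = keys.index(id)
--         jumpToSeekValue = sum(values[:idx])
--         currentRecordOffset = values[idx]
--     else:
--         jumpToSeekValue = sum(values)
--         currentRecordOffset = 0
--     return { "jumpToSeekValue": jumpToSeekValue, "currentRecordOffset": currentRecordOffset }
-- ===== Notes on version B (the rewrite author's own statement) =====
-- stated objective: simpler
-- what changed: Replaces the accumulating loop-with-break by an index lookup on the key list plus a slice-sum of the value prefix (sum of all values when the key is absent).
import Mathlib
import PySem

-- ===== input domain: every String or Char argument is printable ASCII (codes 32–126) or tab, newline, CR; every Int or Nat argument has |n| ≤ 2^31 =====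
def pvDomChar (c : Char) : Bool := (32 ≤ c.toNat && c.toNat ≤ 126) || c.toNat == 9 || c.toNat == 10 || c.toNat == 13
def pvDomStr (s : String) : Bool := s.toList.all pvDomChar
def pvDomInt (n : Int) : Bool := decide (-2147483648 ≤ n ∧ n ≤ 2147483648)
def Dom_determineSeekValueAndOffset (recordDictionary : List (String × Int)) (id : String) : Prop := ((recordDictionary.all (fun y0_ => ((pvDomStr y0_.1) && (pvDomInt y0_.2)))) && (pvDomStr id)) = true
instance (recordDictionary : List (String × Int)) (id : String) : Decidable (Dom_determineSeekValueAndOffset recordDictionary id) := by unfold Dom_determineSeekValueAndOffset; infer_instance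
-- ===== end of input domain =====

-- B replaces A's accumulating loop-with-break by an index lookup on the key list plus a slice-sum of the value prefix (simpler decomposition, same return value).


-- ===== PORT A =====
-- helper: the for-loop with break, carrying the jumpToSeekValue accumulator
def dsvoLoop (recordDictionary : List (String × Int)) (id : String) (jump : Int) : Int × Int :=
  match recordDictionary with
  | [] => (jump, 0)
  | (key, recordOffset) :: rest =>
    if key == id then (jump, recordOffset)
    else dsvoLoop rest id (jump + recordOffset)

def determineSeekValueAndOffset (recordDictionary : List (String × Int)) (id : String) : List (String × Int) :=
  let r := dsvoLoop recordDictionary id 0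
  [("jumpToSeekValue", r.1), ("currentRecordOffset", r.2)]

-- ===== PORT B =====
def determineSeekValueAndOffset_alt (recordDictionary : List (String × Int)) (id : String) : List (String × Int) :=
  let keys := recordDictionary.map Prod.fst
  let values := recordDictionary.map Prod.snd
  match PySem.List.index? keys id with
  | some idx =>
      [("jumpToSeekValue", (values.take idx).sum), ("currentRecordOffset", values.getD idx 0)]
  | none =>
      [("jumpToSeekValue", values.sum), ("currentRecordOffset", (0 : Int))]

-- ===== PRECONDITION & SPEC =====
def Spec_determineSeekValueAndOffset (recordDictionary : List (String × Int)) (id : String) (out : List (String × Int)) : Prop := out = determineSeekValueAndOffset_alt recordDictionary id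
instance (recordDictionary : List (String × Int)) (id : String) (out : List (String × Int)) : Decidable (Spec_determineSeekValueAndOffset recordDictionary id out) := by unfold Spec_determineSeekValueAndOffset; infer_instance

-- ===== CLAIM (what is proved, stated in full; the proofs are below) =====
def Claim_equal_determineSeekValueAndOffset : Prop := ∀ (recordDictionary : List (String × Int)) (id : String), Dom_determineSeekValueAndOffset recordDictionary id → Spec_determineSeekValueAndOffset recordDictionary id (determineSeekValueAndOffset recordDictionary id)

-- ===== LEMMAS AND PROOFS =====

-- ===== VERDICT (by name: the statement is the Claim_ definition above) =====
lemma dsvoLoop_char (rd : List (String × Int)) (id : String) (jump : Int) :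
    dsvoLoop rd id jump =
      match PySem.List.index? (rd.map Prod.fst) id with
      | some idx => (jump + ((rd.map Prod.snd).take idx).sum, (rd.map Prod.snd).getD idx 0)
      | none => (jump + (rd.map Prod.snd).sum, 0) := by
  induction rd generalizing jump with
  | nil => simp [dsvoLoop, PySem.List.index?]
  | cons hd tl ih =>
    obtain ⟨k, v⟩ := hd
    by_cases hk : k = id
    · subst hk
      have h0 : PySem.List.index? (List.map Prod.fst ((k, v) :: tl)) k = some 0 := by
        simpa using PySem.List.index?_cons_self (x := k) (xs := tl.map Prod.fst)
      rw [h0]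
      simp [dsvoLoop]
    · rw [show dsvoLoop ((k, v) :: tl) id jump = dsvoLoop tl id (jump + v) from by
        simp [dsvoLoop, hk]]
      rw [ih]
      rw [show PySem.List.index? (((k, v) :: tl).map Prod.fst) id
            = (PySem.List.index? (tl.map Prod.fst) id).map (· + 1) from by
        simpa using PySem.List.index?_cons_of_ne (xs := tl.map Prod.fst) (x := k) (v := id) hk]
      cases h : PySem.List.index? (tl.map Prod.fst) id with
      | none => simp; ring
      | some j => simp [List.take_succ_cons]; ring

theorem determineSeekValueAndOffset_spec : Claim_equal_determineSeekValueAndOffset := by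
  intro rd id _
  unfold Spec_determineSeekValueAndOffset determineSeekValueAndOffset determineSeekValueAndOffset_alt
  rw [dsvoLoop_char]
  cases h : PySem.List.index? (rd.map Prod.fst) id <;>
    rw [PySem.List.index?_eq_idxOf?] at h <;> simp [h]
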